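-- pv_equiv track=rewrite | github.com/hitachi-nlp/FLD-generator | aacorpus/formal_logic/replacements.py | generate_replacement_mappings
-- ===== SOURCE A (Python) =====
-- from typing import Dict, List, Any, Iterable, Tuple, Optional
--
-- def generate_replacement_mappings(src_objs: List[Any],
--                                   tgt_objs: List[Any]) -> Iterable[Optional[Dict[Any, Any]]]:
--     if len(set(src_objs)) != len(src_objs):
--         raise ValueError()
--     if len(set(tgt_objs)) != len(tgt_objs):
--         raise ValueError()
--
--     if len(src_objs) > 0 and len(tgt_objs) > 0:
--         for chosen_tgt_objs in _permutations_with_replacement(tgt_objs, len(src_objs)):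
--             yield {
--                 src_obj: tgt_obj
--                 for src_obj, tgt_obj in zip(src_objs, chosen_tgt_objs)
--             }
--     elif len(src_objs) == 0 and len(tgt_objs) == 0:
--         yield {}
--     else:
--         yield None
--
-- def _permutations_with_replacement(objs: List[Any], length: int) -> Iterable[List[Any]]:
--     if length < 1:
--         return
--
--     if length == 1:
--         for obj in objs:
--             yield [obj]
--     else:
--         for i_head in range(len(objs)):
--             for tail in _permutations_with_replacement(objs, length - 1):
--                 yield [objs[i_head]] + tail
-- ===== SOURCE B (Python) =====
-- def generate_replacement_mappings(src_objs, tgt_objs):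
--     if len(set(src_objs)) != len(src_objs):
--         raise ValueError()
--     if len(set(tgt_objs)) != len(tgt_objs):
--         raise ValueError()
--
--     if len(src_objs) > 0 and len(tgt_objs) > 0:
--         # iterative cartesian-product build (itertools.product-style fold),
--         # no recursion: level k holds all length-k prefixes in lexicographic order
--         tuples = [[]]
--         for _ in src_objs:
--             tuples = [t + [o] for t in tuples for o in tgt_objs]
--         for t in tuples:
--             yield dict(zip(src_objs, t))
--     elif len(src_objs) == 0 and len(tgt_objs) == 0:
--         yield {}
--     else:
--         yield None
-- ===== Notes on version B (the rewrite author's own statement) =====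
-- stated objective: alternative
-- what changed: Replaces the recursive per-tuple generator _permutations_with_replacement with a single iterative cartesian-product fold (itertools.product-style) that builds each level of tuples from the previous one, then zips each tuple with src_objs.
import Mathlib
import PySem

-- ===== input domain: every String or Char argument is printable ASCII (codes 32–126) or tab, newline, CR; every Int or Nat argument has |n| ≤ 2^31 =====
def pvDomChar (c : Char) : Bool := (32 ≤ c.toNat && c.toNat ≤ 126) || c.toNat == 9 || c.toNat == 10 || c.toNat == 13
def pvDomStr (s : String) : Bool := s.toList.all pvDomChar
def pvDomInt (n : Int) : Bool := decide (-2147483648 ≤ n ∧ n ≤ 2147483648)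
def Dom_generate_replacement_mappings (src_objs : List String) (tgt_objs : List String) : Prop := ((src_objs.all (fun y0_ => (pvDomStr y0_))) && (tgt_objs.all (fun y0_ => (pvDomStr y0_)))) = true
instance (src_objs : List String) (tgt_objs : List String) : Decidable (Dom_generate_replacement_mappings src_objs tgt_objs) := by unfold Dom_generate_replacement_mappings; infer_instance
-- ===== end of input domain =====

-- B replaces A's recursive tuple generator with an iterative itertools.product-style
-- fold building each level of tuples from the previous one (objective: alternative).

-- ===== PORT A =====
-- port of _permutations_with_replacement (length is len(src_objs), a Nat)
def pvPermsWR (objs : List String) (len : Nat) : List (List String) :=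
  if len < 1 then []
  else if len = 1 then objs.map (fun o => [o])
  else
    (List.range objs.length).flatMap (fun i_head =>
      (pvPermsWR objs (len - 1)).map (fun tail => objs.getD i_head "" :: tail))
      -- objs[i_head] : i_head ∈ range(len(objs)) is always in range, so getD is exact
termination_by len
decreasing_by omega

def generate_replacement_mappings (src_objs : List String) (tgt_objs : List String) : List (Option (List (String × String))) :=
  if (PySem.Set.ofList src_objs).length ≠ src_objs.length then []  -- raise ValueError: excluded by Pre_
  else if (PySem.Set.ofList tgt_objs).length ≠ tgt_objs.length then []  -- raise ValueError: excluded by Pre_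
  else if 0 < src_objs.length ∧ 0 < tgt_objs.length then
    (pvPermsWR tgt_objs src_objs.length).map (fun chosen_tgt_objs =>
      some (((src_objs.zip chosen_tgt_objs).foldl
        (fun d p => d.insert p.1 p.2) (PySem.Dict.empty : PySem.Dict String String)).items))
  else if src_objs.length = 0 ∧ tgt_objs.length = 0 then [some []]
  else [none]

-- ===== PORT B =====
-- one level of the product build: tuples = [t + [o] for t in tuples for o in tgt_objs]
def pvProductStep (tgt_objs : List String) (acc : List (List String)) : List (List String) :=
  acc.flatMap (fun t => tgt_objs.map (fun o => t ++ [o]))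

def generate_replacement_mappings_alt (src_objs : List String) (tgt_objs : List String) : List (Option (List (String × String))) :=
  if (PySem.Set.ofList src_objs).length ≠ src_objs.length then []  -- raise ValueError: excluded by Pre_
  else if (PySem.Set.ofList tgt_objs).length ≠ tgt_objs.length then []  -- raise ValueError: excluded by Pre_
  else if 0 < src_objs.length ∧ 0 < tgt_objs.length then
    (src_objs.foldl (fun tuples _ => pvProductStep tgt_objs tuples) [[]]).map
      (fun t => some ((PySem.Dict.ofList (src_objs.zip t)).items))
  else if src_objs.length = 0 ∧ tgt_objs.length = 0 then [some []]
  else [none]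

-- ===== PRECONDITION & SPEC =====
-- Pre_ excludes exactly the inputs on which A raises ValueError: a duplicate in src_objs or tgt_objs.
def Pre_generate_replacement_mappings (src_objs : List String) (tgt_objs : List String) : Prop :=
  src_objs.Nodup ∧ tgt_objs.Nodup
instance (src_objs : List String) (tgt_objs : List String) : Decidable (Pre_generate_replacement_mappings src_objs tgt_objs) := by unfold Pre_generate_replacement_mappings; infer_instance

def pvWitness_generate_replacement_mappings : List String × List String := (["a", "b"], ["x", "y"])

def Spec_generate_replacement_mappings (src_objs : List String) (tgt_objs : List String) (out : List (Option (List (String × String)))) : Prop := out = generate_replacement_mappings_alt src_objs tgt_objs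
instance (src_objs : List String) (tgt_objs : List String) (out : List (Option (List (String × String)))) : Decidable (Spec_generate_replacement_mappings src_objs tgt_objs out) := by unfold Spec_generate_replacement_mappings; infer_instance

-- ===== CLAIM (what is proved, stated in full; the proofs are below) =====
def Claim_equal_generate_replacement_mappings : Prop := ∀ (src_objs : List String) (tgt_objs : List String), Dom_generate_replacement_mappings src_objs tgt_objs → Pre_generate_replacement_mappings src_objs tgt_objs → Spec_generate_replacement_mappings src_objs tgt_objs (generate_replacement_mappings src_objs tgt_objs)

-- ===== LEMMAS AND PROOFS =====

-- canonical lexicographic product (head varies slowest)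
def pvLex (objs : List String) : Nat → List (List String)
  | 0 => [[]]
  | n + 1 => objs.flatMap (fun o => (pvLex objs n).map (o :: ·))

theorem pvFlatMap_singleton {α β : Type} (l : List α) (f : α → β) :
    l.flatMap (fun o => [f o]) = l.map f := by
  induction l with
  | nil => rfl
  | cons x xs ih => simp [List.flatMap_cons, ih]

theorem pvProductStep_pvLex (tgt : List String) (n : Nat) :
    pvProductStep tgt (pvLex tgt n) = pvLex tgt (n + 1) := by
  induction n with
  | zero =>
    show pvProductStep tgt [[]] = pvLex tgt 1
    simp [pvProductStep, pvLex, pvFlatMap_singleton]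
  | succ n ih =>
    show pvProductStep tgt (pvLex tgt (n + 1)) = pvLex tgt (n + 2)
    conv_lhs => rw [pvLex]
    conv_rhs => rw [pvLex, ← ih]
    unfold pvProductStep
    rw [List.flatMap_assoc]
    congr 1
    funext o
    rw [List.flatMap_map, List.map_flatMap]
    congr 1
    funext t
    simp

theorem foldl_pvProductStep (tgt : List String) (l : List String) (n : Nat) :
    l.foldl (fun tuples _ => pvProductStep tgt tuples) (pvLex tgt n) = pvLex tgt (n + l.length) := by
  induction l generalizing n with
  | nil => simp
  | cons x xs ih =>
    simp only [List.foldl_cons, pvProductStep_pvLex, List.length_cons]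
    rw [ih]
    ring_nf

theorem range_getD_flatMap {β : Type} (xs : List String) (f : String → List β) :
    (List.range xs.length).flatMap (fun i => f (xs.getD i "")) = xs.flatMap f := by
  induction xs with
  | nil => simp
  | cons x xs ih =>
    rw [List.length_cons, List.range_succ_eq_map]
    simp only [List.flatMap_cons, List.flatMap_map]
    simp only [List.getD_cons_zero, List.getD_cons_succ]
    rw [ih]

theorem pvPermsWR_eq_pvLex (objs : List String) (n : Nat) : 1 ≤ n →
    pvPermsWR objs n = pvLex objs n := by
  induction n with
  | zero => omega
  | succ n ih =>
    intro _
    cases n with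
    | zero =>
      rw [pvPermsWR]
      simp only [Nat.lt_irrefl, if_false]
      show objs.map (fun o => [o]) = pvLex objs 1
      simp [pvLex, pvFlatMap_singleton]
    | succ m =>
      rw [pvPermsWR]
      have h1 : ¬ (m + 1 + 1 < 1) := by omega
      have h2 : ¬ (m + 1 + 1 = 1) := by omega
      rw [if_neg h1, if_neg h2]
      have hih := ih (by omega)
      simp only [Nat.add_sub_cancel, hih]
      conv_rhs => rw [pvLex]
      rw [← range_getD_flatMap objs (fun o => (pvLex objs (m + 1)).map (o :: ·))]

theorem pvLex_length (objs : List String) (n : Nat) (t : List String) (ht : t ∈ pvLex objs n) :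
    t.length = n := by
  induction n generalizing t with
  | zero => simp [pvLex] at ht; simp [ht]
  | succ n ih =>
    simp only [pvLex, List.mem_flatMap, List.mem_map] at ht
    obtain ⟨o, _, t', ht', rfl⟩ := ht
    simp [ih t' ht']

theorem pvDictFold_items (l : List (String × String)) (h : (l.map Prod.fst).Nodup) :
    (l.foldl (fun d p => d.insert p.1 p.2) (PySem.Dict.empty : PySem.Dict String String)).items = l := by
  rw [PySem.Dict.items_foldl_insert_fresh l Prod.fst Prod.snd PySem.Dict.empty (by intro a _; rfl) h]
  simp [PySem.Dict.empty]

theorem pvDictOfList_items (l : List (String × String)) (h : (l.map Prod.fst).Nodup) :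
    (PySem.Dict.ofList l).items = l := by
  have : PySem.Dict.ofList l = l.foldl (fun d p => d.insert p.1 p.2) PySem.Dict.empty := by
    unfold PySem.Dict.ofList PySem.Dict.update; rfl
  rw [this, pvDictFold_items l h]

-- ===== VERDICT (by name: the statement is the Claim_ definition above) =====
theorem generate_replacement_mappings_spec : Claim_equal_generate_replacement_mappings := by
  intro src tgt _ hpre
  obtain ⟨hs, ht⟩ := hpre
  unfold Spec_generate_replacement_mappings
  unfold generate_replacement_mappings generate_replacement_mappings_alt
  rw [PySem.Set.ofList_eq_self_of_nodup src hs, PySem.Set.ofList_eq_self_of_nodup tgt ht]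
  simp only [ne_eq, not_true_eq_false, if_false]
  split_ifs with h1 h2
  · obtain ⟨hsl, htl⟩ := h1
    have hfold : src.foldl (fun tuples _ => pvProductStep tgt tuples) [[]] = pvLex tgt src.length := by
      have h0 := foldl_pvProductStep tgt src 0
      simpa [pvLex] using h0
    rw [hfold, pvPermsWR_eq_pvLex tgt src.length hsl]
    apply List.map_congr_left
    intro t htmem
    have hlen : t.length = src.length := pvLex_length tgt src.length t htmem
    have hkeys : (src.zip t).map Prod.fst = src :=
      List.map_fst_zip (le_of_eq hlen.symm)
    have hnk : ((src.zip t).map Prod.fst).Nodup := by rw [hkeys]; exact hs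
    rw [pvDictFold_items (src.zip t) hnk, pvDictOfList_items (src.zip t) hnk]
  · rfl
  · rfl
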